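-- pv_equiv track=rewrite | github.com/KaduMelo/stackspot-ia | review_by_file.py | split_diff_into_files
-- ===== SOURCE A (Python) =====
-- from typing import List, Tuple
--
-- def split_diff_into_files(diff: str) -> List[str]:
--     """
--     Split the diff string into a list of diffs, one for each file.
--     """
--     file_diffs = []
--     current_file_diff = []
--     for line in diff.split('\n'):
--         if line.startswith('diff --git'):
--             if current_file_diff:
--                 file_diffs.append('\n'.join(current_file_diff))
--                 current_file_diff = []
--         current_file_diff.append(line)
--     if current_file_diff:  # Add the last file diff
--         file_diffs.append('\n'.join(current_file_diff))
--     return file_diffs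
-- ===== SOURCE B (Python) =====
-- def split_diff_into_files(diff: str):
--     """
--     Split the diff string into a list of diffs, one for each file.
--     Segment-by-segment: from each segment start, scan forward to the next
--     'diff --git' boundary, slice the lines, and jump there.
--     """
--     lines = diff.split('\n')
--     n = len(lines)
--     result = []
--     i = 0
--     while i < n:
--         j = i + 1
--         while j < n and not lines[j].startswith('diff --git'):
--             j += 1
--         result.append('\n'.join(lines[i:j]))
--         i = j
--     return result
-- ===== Notes on version B (the rewrite author's own statement) =====
-- stated objective: alternative
-- what changed: Replaces the single accumulating loop (growing a current-file buffer and flushing it at each boundary) with a segment scanner: from each segment start it finds the next 'diff --git' boundary, slices that run of lines out, and jumps there.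
import Mathlib
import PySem

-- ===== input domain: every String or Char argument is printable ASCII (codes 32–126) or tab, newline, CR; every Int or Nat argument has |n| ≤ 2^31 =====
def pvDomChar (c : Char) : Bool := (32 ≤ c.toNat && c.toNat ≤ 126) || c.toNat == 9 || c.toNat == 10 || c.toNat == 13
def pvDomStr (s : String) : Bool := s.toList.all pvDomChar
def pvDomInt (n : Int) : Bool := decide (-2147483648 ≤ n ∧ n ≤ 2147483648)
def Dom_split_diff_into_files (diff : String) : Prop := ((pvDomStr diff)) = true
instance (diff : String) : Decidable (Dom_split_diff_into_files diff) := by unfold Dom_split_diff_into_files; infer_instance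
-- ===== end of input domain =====

-- B replaces A's accumulating flush-at-boundary loop with a segment scanner that
-- slices from each start to the next 'diff --git' boundary (objective: alternative).


-- ===== PORT A =====
-- diff.split('\n'): sep is the nonempty literal "\n", so split? is always some (getD unreachable)
def pyLines (diff : String) : List String := (PySem.Str.split? diff "\n").getD []

-- line.startswith('diff --git')
def isBoundary (s : String) : Bool := PySem.Str.startswith s "diff --git"

-- one step of A's loop body: maybe flush the current buffer, then append the line
def splitA_step (st : List String × List String) (line : String) : List String × List String :=
  let st' :=
    if isBoundary line then
      if st.2 ≠ [] then (st.1 ++ [PySem.Str.join "\n" st.2], ([] : List String)) else st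
    else st
  (st'.1, st'.2 ++ [line])

def split_diff_into_files (diff : String) : List String :=
  let st := (pyLines diff).foldl splitA_step ([], [])
  if st.2 ≠ [] then st.1 ++ [PySem.Str.join "\n" st.2] else st.1

-- ===== PORT B =====
-- segment scanner: take lines up to the next boundary, emit, continue from there
def splitB_go : List String → List String
  | [] => []
  | l :: rest =>
      PySem.Str.join "\n" (l :: rest.takeWhile (fun s => !isBoundary s))
        :: splitB_go (rest.dropWhile (fun s => !isBoundary s))
termination_by lines => lines.length
decreasing_by
  simpa using Nat.lt_succ_of_le (List.length_dropWhile_le _ _)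

def split_diff_into_files_alt (diff : String) : List String :=
  splitB_go (pyLines diff)

-- ===== PRECONDITION & SPEC =====
def Spec_split_diff_into_files (diff : String) (out : List String) : Prop := out = split_diff_into_files_alt diff
instance (diff : String) (out : List String) : Decidable (Spec_split_diff_into_files diff out) := by unfold Spec_split_diff_into_files; infer_instance

-- ===== CLAIM (what is proved, stated in full; the proofs are below) =====
def Claim_equal_split_diff_into_files : Prop := ∀ (diff : String), Dom_split_diff_into_files diff → Spec_split_diff_into_files diff (split_diff_into_files diff)

-- ===== LEMMAS AND PROOFS =====

-- A's finalization step, as applied to the loop's final state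
def splitA_fin (st : List String × List String) : List String :=
  if st.2 ≠ [] then st.1 ++ [PySem.Str.join "\n" st.2] else st.1

-- Loop invariant: with a nonempty current buffer, A's remaining loop + finalization
-- produces exactly the finished diffs, then the current segment (buffer + lines up to
-- the next boundary), then B's scan of the rest.
theorem splitA_loop_eq (lines : List String) :
    ∀ (fds cur : List String), cur ≠ [] →
      splitA_fin (lines.foldl splitA_step (fds, cur)) =
        fds ++ PySem.Str.join "\n"
            (cur ++ lines.takeWhile (fun s => !isBoundary s))
          :: splitB_go (lines.dropWhile (fun s => !isBoundary s)) := by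
  induction lines with
  | nil =>
      intro fds cur hcur
      simp [splitA_fin, hcur, splitB_go]
  | cons l rest ih =>
      intro fds cur hcur
      by_cases hb : isBoundary l = true
      · have hstep : splitA_step (fds, cur) l = (fds ++ [PySem.Str.join "\n" cur], [l]) := by
          simp [splitA_step, hb, hcur]
        rw [List.foldl_cons, hstep, ih _ [l] (by simp)]
        simp [hb, splitB_go]
      · have hstep : splitA_step (fds, cur) l = (fds, cur ++ [l]) := by
          simp [splitA_step, hb]
        rw [List.foldl_cons, hstep, ih _ (cur ++ [l]) (by simp)]
        simp [hb]

-- ===== VERDICT (by name: the statement is the Claim_ definition above) =====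
theorem split_diff_into_files_spec : Claim_equal_split_diff_into_files := by
  intro diff _
  show split_diff_into_files diff = split_diff_into_files_alt diff
  unfold split_diff_into_files split_diff_into_files_alt
  cases h : pyLines diff with
  | nil => simp [splitB_go]
  | cons l rest =>
      have hfirst : splitA_step ([], []) l = ([], [l]) := by
        by_cases hb : isBoundary l = true <;> simp [splitA_step, hb]
      show splitA_fin ((l :: rest).foldl splitA_step ([], [])) = splitB_go (l :: rest)
      rw [List.foldl_cons, hfirst, splitA_loop_eq rest [] [l] (by simp)]
      by_cases hb : rest = []
      · simp [hb, splitB_go]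
      · rw [splitB_go]
        simp
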